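-- pv_equiv track=rewrite | github.com/viktornordling/adventofcode2024 | 12/solve.py | get_circumference
-- ===== SOURCE A (Python) =====
-- dirs = [(0, -1), (1, 0), (0, 1), (-1, 0)]
--
-- def get_circumference(region):
--     circumference = 0
--     for cell in region:
--         for dir in dirs:
--             next = cell[0] + dir[0], cell[1] + dir[1]
--             if next not in region:
--                 circumference += 1
--     return circumference
-- ===== SOURCE B (Python) =====
-- def get_circumference(region):
--     cells = set(region)
--     shared = sum((x + 1, y) in cells for (x, y) in cells) \
--            + sum((x, y + 1) in cells for (x, y) in cells)
--     return 4 * len(cells) - 2 * shared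
-- ===== Notes on version B (the rewrite author's own statement) =====
-- stated objective: alternative
-- what changed: Replaces A's per-cell four-direction missing-edge accumulation by the closed form 4*n - 2*shared, where a two-direction (right/down) scan counts each internal shared edge exactly once.
import Mathlib
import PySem

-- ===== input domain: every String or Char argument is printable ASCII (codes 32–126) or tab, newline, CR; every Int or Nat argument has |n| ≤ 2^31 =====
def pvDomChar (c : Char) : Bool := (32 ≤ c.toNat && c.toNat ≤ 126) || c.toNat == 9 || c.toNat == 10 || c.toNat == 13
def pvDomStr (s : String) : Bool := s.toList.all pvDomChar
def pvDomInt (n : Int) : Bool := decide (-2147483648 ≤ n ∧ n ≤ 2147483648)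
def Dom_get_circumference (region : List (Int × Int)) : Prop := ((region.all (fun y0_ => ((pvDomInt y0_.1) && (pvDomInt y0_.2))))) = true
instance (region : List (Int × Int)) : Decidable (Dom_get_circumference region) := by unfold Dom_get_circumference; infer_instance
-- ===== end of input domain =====

-- B computes the perimeter by the closed form 4·n − 2·shared over the set of cells with a
-- two-direction adjacency scan (same cost), instead of A's per-cell four-direction missing-edge count.

-- ===== PORT A =====
def pvDirs : List (Int × Int) := [(0, -1), (1, 0), (0, 1), (-1, 0)]

def get_circumference (region : List (Int × Int)) : Int :=
  region.foldl (fun circumference cell =>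
    pvDirs.foldl (fun c dir =>
      if (cell.1 + dir.1, cell.2 + dir.2) ∈ region then c else c + 1) circumference) 0

-- ===== PORT B =====
def get_circumference_alt (region : List (Int × Int)) : Int :=
  let cells := PySem.Set.ofList region
  let shared : Int :=
    (cells.countP (fun c => cells.contains (c.1 + 1, c.2)) : Int)
    + (cells.countP (fun c => cells.contains (c.1, c.2 + 1)) : Int)
  4 * (cells.length : Int) - 2 * shared

-- ===== PRECONDITION & SPEC =====
-- region is a Python set (ported as a List of DISTINCT elements); Pre_ states exactly that
-- representation invariant, so it excludes no actual set input.
def Pre_get_circumference (region : List (Int × Int)) : Prop := region.Nodup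
instance (region : List (Int × Int)) : Decidable (Pre_get_circumference region) := by unfold Pre_get_circumference; infer_instance

def pvWitness_get_circumference : (List (Int × Int)) := [(0, 0), (1, 0), (1, 1)]

def Spec_get_circumference (region : List (Int × Int)) (out : Int) : Prop := out = get_circumference_alt region
instance (region : List (Int × Int)) (out : Int) : Decidable (Spec_get_circumference region out) := by unfold Spec_get_circumference; infer_instance

-- ===== CLAIM (what is proved, stated in full; the proofs are below) =====
def Claim_equal_get_circumference : Prop := ∀ (region : List (Int × Int)), Dom_get_circumference region → Pre_get_circumference region → Spec_get_circumference region (get_circumference region)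

-- ===== LEMMAS AND PROOFS =====

theorem pv_foldl_add_nodup (xs s : List (Int × Int)) (h : (s ++ xs).Nodup) :
    xs.foldl PySem.Set.add s = s ++ xs := by
  induction xs generalizing s with
  | nil => simp
  | cons x xs ih =>
    have hx : x ∉ s := by
      intro hmem
      exact (List.disjoint_left.mp h.disjoint hmem) (by simp)
    have : PySem.Set.add s x = s ++ [x] := by
      simp [PySem.Set.add, PySem.Set.contains, hx]
    rw [List.foldl_cons, this, ih (s ++ [x]) (by simpa using h)]
    simp

theorem pv_ofList_nodup (xs : List (Int × Int)) (h : xs.Nodup) :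
    PySem.Set.ofList xs = xs := by
  have := pv_foldl_add_nodup xs [] (by simpa using h)
  simpa [PySem.Set.ofList_eq_foldl] using this

-- the fold of A, over a fixed ambient region R, as 4·len − the four adjacency counts
theorem pvA_fold (R : List (Int × Int)) (l : List (Int × Int)) (a : Int) :
    l.foldl (fun circumference cell =>
      pvDirs.foldl (fun c dir =>
        if (cell.1 + dir.1, cell.2 + dir.2) ∈ R then c else c + 1) circumference) a
    = a + 4 * (l.length : Int)
      - ((l.countP (fun c => decide ((c.1, c.2 - 1) ∈ R)) : Int)
        + (l.countP (fun c => decide ((c.1 + 1, c.2) ∈ R)) : Int)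
        + (l.countP (fun c => decide ((c.1, c.2 + 1) ∈ R)) : Int)
        + (l.countP (fun c => decide ((c.1 - 1, c.2) ∈ R)) : Int)) := by
  induction l generalizing a with
  | nil => simp
  | cons c l ih =>
    rw [List.foldl_cons, ih]
    simp only [pvDirs, List.foldl_cons, List.foldl_nil, List.countP_cons]
    norm_num [sub_eq_add_neg]
    split_ifs <;> ring

-- symmetry: on a duplicate-free list, as many cells see their +v neighbour as their −v neighbour
theorem pv_count_symm (R : List (Int × Int)) (h : R.Nodup) (v : Int × Int) :
    R.countP (fun c => decide ((c.1 + v.1, c.2 + v.2) ∈ R))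
      = R.countP (fun c => decide ((c.1 - v.1, c.2 - v.2) ∈ R)) := by
  have key : ∀ p : Int × Int → Bool,
      R.countP p = (R.toFinset.filter (fun c => p c = true)).card := by
    intro p
    rw [List.countP_eq_length_filter]
    rw [← List.toFinset_card_of_nodup (h.filter p), List.toFinset_filter]
  rw [key, key]
  refine Finset.card_bij' (fun c _ => (c.1 + v.1, c.2 + v.2))
    (fun d _ => (d.1 - v.1, d.2 - v.2)) ?_ ?_ ?_ ?_
  · intro c hc
    simp only [Finset.mem_filter, List.mem_toFinset, decide_eq_true_eq] at hc ⊢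
    refine ⟨hc.2, ?_⟩
    simpa using hc.1
  · intro d hd
    simp only [Finset.mem_filter, List.mem_toFinset, decide_eq_true_eq] at hd ⊢
    refine ⟨hd.2, ?_⟩
    simpa using hd.1
  · intro c hc; simp
  · intro d hd; simp

-- ===== VERDICT (by name: the statement is the Claim_ definition above) =====
theorem get_circumference_spec : Claim_equal_get_circumference := by
  intro region _ hpre
  unfold Spec_get_circumference get_circumference get_circumference_alt
  rw [pv_ofList_nodup region hpre, pvA_fold region region 0]
  have h1 := pv_count_symm region hpre (1, 0)
  have h2 := pv_count_symm region hpre (0, 1)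
  simp only [add_zero, sub_zero] at h1 h2
  simp only [PySem.Set.contains, List.contains_eq_mem]
  omega
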